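-- pv_equiv track=rewrite | github.com/LindgeW/MetaAug4NER | utils/tag_util.py | extract_ner_bieso_span
-- ===== SOURCE A (Python) =====
-- def extract_ner_bieso_span(tag_seq):
--     spans = []
--     s = 0
--     start = False
--     type_b = None
--     for i, tag in enumerate(tag_seq):
--         if tag == 'O':
--             start = False
--         elif tag.startswith('S-'):
--             spans.append((i, i, tag.split('-')[1]))
--             start = False
--         elif tag.startswith('B-'):
--             s = i
--             type_b = tag.split('-')[1]
--             start = True
--         elif tag.startswith('E-'):
--             if start and tag.split('-')[1] == type_b:
--                 spans.append((s, i, type_b))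
--                 start = False
--         else:
--             if '-' not in tag or tag.split('-')[1] != type_b:
--                 start = False
--
--     return spans
-- ===== SOURCE B (Python) =====
-- def extract_ner_bieso_span(tag_seq):
--     spans = []
--     n = len(tag_seq)
--     i = 0
--     while i < n:
--         tag = tag_seq[i]
--         if tag.startswith('S-'):
--             spans.append((i, i, tag.split('-')[1]))
--             i += 1
--         elif tag.startswith('B-'):
--             x = tag.split('-')[1]
--             s = i
--             j = i + 1
--             while True:
--                 if j >= n:
--                     i = j
--                     break
--                 t = tag_seq[j]
--                 if t.startswith('S-') or t.startswith('B-'):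
--                     i = j          # reprocess the abandoning tag in the outer loop
--                     break
--                 if t.startswith('E-'):
--                     if t.split('-')[1] == x:
--                         spans.append((s, j, x))
--                         i = j + 1
--                         break
--                     j += 1
--                 elif t == 'O' or '-' not in t or t.split('-')[1] != x:
--                     i = j + 1
--                     break
--                 else:
--                     j += 1
--         else:
--             i += 1
--     return spans
-- ===== Notes on version B (the rewrite author's own statement) =====
-- stated objective: alternative
-- what changed: Replaces A's single flat scan with a persistent start/type_b state flag by a nested scan: an outer loop that emits S- spans and, on B-, enters an inner loop that searches for the matching E- and abandons on O/foreign-I/new-B (reprocessing a new B- or S- in the outer loop); no persistent flag state is kept.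
import Mathlib
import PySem

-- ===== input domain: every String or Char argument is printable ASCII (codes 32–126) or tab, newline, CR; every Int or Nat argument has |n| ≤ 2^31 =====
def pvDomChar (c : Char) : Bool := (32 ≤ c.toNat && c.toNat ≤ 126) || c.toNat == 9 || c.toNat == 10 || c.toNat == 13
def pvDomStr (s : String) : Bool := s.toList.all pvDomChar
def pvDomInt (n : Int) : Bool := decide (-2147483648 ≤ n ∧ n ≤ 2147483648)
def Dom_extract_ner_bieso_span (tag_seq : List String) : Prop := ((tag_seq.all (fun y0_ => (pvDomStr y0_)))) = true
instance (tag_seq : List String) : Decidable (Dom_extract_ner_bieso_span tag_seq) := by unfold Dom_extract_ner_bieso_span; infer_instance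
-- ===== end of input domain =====

-- B replaces A's flat state-flag scan by a nested scan (outer loop + inner span-closing loop); objective: alternative decomposition, same cost.

-- tag.split('-')[1]; every call site guarantees '-' ∈ tag, so the default is never used
def pvSplit1 (tag : String) : String :=
  (PySem.List.pyGet? ((PySem.Str.split? tag "-").getD []) 1).getD ""

-- ===== PORT A =====
-- the for-loop of A as structural recursion over the same state (spans, s, start, type_b), i the enumerate index
def aLoop (spans : List (Int × Int × String)) (s : Int) (start : Bool) (type_b : Option String)
    (i : Int) : List String → List (Int × Int × String)
  | [] => spans
  | tag :: rest =>
    if tag = "O" then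
      aLoop spans s false type_b (i+1) rest
    else if PySem.Str.startswith tag "S-" then
      aLoop (spans ++ [(i, i, pvSplit1 tag)]) s false type_b (i+1) rest
    else if PySem.Str.startswith tag "B-" then
      aLoop spans i true (some (pvSplit1 tag)) (i+1) rest
    else if PySem.Str.startswith tag "E-" then
      if start = true ∧ type_b = some (pvSplit1 tag) then
        aLoop (spans ++ [(s, i, pvSplit1 tag)]) s false type_b (i+1) rest
      else
        aLoop spans s start type_b (i+1) rest
    else
      if ¬ (PySem.Str.isIn "-" tag) = true ∨ some (pvSplit1 tag) ≠ type_b then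
        aLoop spans s false type_b (i+1) rest
      else
        aLoop spans s start type_b (i+1) rest

def extract_ner_bieso_span (tag_seq : List String) : List (Int × Int × String) :=
  aLoop [] 0 false none 0 tag_seq

-- ===== PORT B =====
-- outer scan: skip everything except S- (emit) and B- (enter the inner loop)
mutual
def bOuter (i : Int) : List String → List (Int × Int × String)
  | [] => []
  | tag :: rest =>
    if PySem.Str.startswith tag "S-" then
      (i, i, pvSplit1 tag) :: bOuter (i+1) rest
    else if PySem.Str.startswith tag "B-" then
      bInner i (pvSplit1 tag) (i+1) rest
    else
      bOuter (i+1) rest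
termination_by l => 2 * l.length
-- inner scan: looking for E-x closing the span opened at s; abandon on S-/B- (reprocess) or on O / dashless / foreign type
def bInner (s : Int) (x : String) (j : Int) : List String → List (Int × Int × String)
  | [] => []
  | t :: rest =>
    if PySem.Str.startswith t "S-" ∨ PySem.Str.startswith t "B-" then
      bOuter j (t :: rest)
    else if PySem.Str.startswith t "E-" then
      if pvSplit1 t = x then (s, j, x) :: bOuter (j+1) rest
      else bInner s x (j+1) rest
    else if t = "O" ∨ ¬ (PySem.Str.isIn "-" t) = true ∨ pvSplit1 t ≠ x then
      bOuter (j+1) rest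
    else
      bInner s x (j+1) rest
termination_by l => 2 * l.length + 1
end

def extract_ner_bieso_span_alt (tag_seq : List String) : List (Int × Int × String) :=
  bOuter 0 tag_seq

-- ===== PRECONDITION & SPEC =====
def Spec_extract_ner_bieso_span (tag_seq : List String) (out : List (Int × Int × String)) : Prop := out = extract_ner_bieso_span_alt tag_seq
instance (tag_seq : List String) (out : List (Int × Int × String)) : Decidable (Spec_extract_ner_bieso_span tag_seq out) := by unfold Spec_extract_ner_bieso_span; infer_instance

-- ===== CLAIM (what is proved, stated in full; the proofs are below) =====
def Claim_equal_extract_ner_bieso_span : Prop := ∀ (tag_seq : List String), Dom_extract_ner_bieso_span tag_seq → Spec_extract_ner_bieso_span tag_seq (extract_ner_bieso_span tag_seq)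

-- ===== LEMMAS AND PROOFS =====

-- closed evaluations used when the scanned tag is the literal "O"
theorem oS : PySem.Chars.startswith ['O'] ['S', '-'] = false := by decide
theorem oB : PySem.Chars.startswith ['O'] ['B', '-'] = false := by decide
theorem oE : PySem.Chars.startswith ['O'] ['E', '-'] = false := by decide

-- joint invariant: with the flag down, A's loop is B's outer scan; with the flag up
-- (open span at s of type x), A's loop is B's inner scan — the stale s/type_b of the
-- closed state never influence A's output.
theorem aLoop_eq_b (n : Nat) :
    (∀ l : List String, l.length = n → ∀ spans s tb i,
        aLoop spans s false tb i l = spans ++ bOuter i l) ∧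
    (∀ l : List String, l.length = n → ∀ spans s x i,
        aLoop spans s true (some x) i l = spans ++ bInner s x i l) := by
  induction n using Nat.strong_induction_on with
  | _ n ih =>
    constructor
    · intro l hl spans s tb i
      match l with
      | [] => simp [aLoop, bOuter]
      | tag :: rest =>
        simp only [List.length_cons] at hl
        have IH := ih (rest.length) (by omega)
        rw [aLoop, bOuter]
        split_ifs with h1 h2 h3 h4 h5 h6 <;>
          simp_all [IH.1 rest rfl, IH.2 rest rfl, List.append_assoc, oS, oB]
    · intro l hl spans s x i
      match l with
      | [] => simp [aLoop, bInner]
      | tag :: rest =>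
        simp only [List.length_cons] at hl
        have IH := ih (rest.length) (by omega)
        rw [aLoop, bInner]
        split_ifs with h1 h2 h3 h4 h5 h6 h7 h8 h9 <;>
          simp_all [IH.1 rest rfl, IH.2 rest rfl, bOuter, List.append_assoc, oS, oB, oE]

-- ===== VERDICT (by name: the statement is the Claim_ definition above) =====
theorem extract_ner_bieso_span_spec : Claim_equal_extract_ner_bieso_span := by
  intro tag_seq _
  unfold Spec_extract_ner_bieso_span extract_ner_bieso_span extract_ner_bieso_span_alt
  simpa using (aLoop_eq_b tag_seq.length).1 tag_seq rfl [] 0 none 0
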